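-- pv_equiv track=rewrite | github.com/EnTangledUpInBlue/qShop | codes/standard_surface_code_coordinates.py | surf_check_coords
-- ===== SOURCE A (Python) =====
-- from typing import List, Set, Dict, Tuple
--
-- def surf_check_coords(L1: int, L2: int) -> List[Set[Tuple[int, int]]]:
--     r"""
--     Coordinates for the check locations in the standard surface code
--
--     :param L1: The dimensions of the square lattice for the standard surface code.
--     :param L2:
--
--     :return:
--     """
--
--     if L1 == 1:
--         xcheck_coords = set([(0, 2 * jj + 1) for jj in range(L2 - 1)])
--
--         zcheck_coords = set()
--
--     else:
--         xcheck_coords, zcheck_coords = surf_check_coords(L1 - 1, L2)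
--
--         xcoord = 2 * L1 - 2
--
--         for jj in range(L2 - 1):
--             zcheck_coords.add((xcoord - 1, 2 * jj))
--             xcheck_coords.add((xcoord, 2 * jj + 1))
--
--         zcheck_coords.add((xcoord - 1, 2 * (L2 - 1)))
--
--     return [xcheck_coords, zcheck_coords]
-- ===== SOURCE B (Python) =====
-- def surf_check_coords(L1, L2):
--     xcheck_coords = set()
--     zcheck_coords = set()
--     for ii in range(L1):
--         for jj in range(L2 - 1):
--             xcheck_coords.add((2 * ii, 2 * jj + 1))
--     for ii in range(1, L1):
--         for jj in range(L2 - 1):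
--             zcheck_coords.add((2 * ii - 1, 2 * jj))
--         zcheck_coords.add((2 * ii - 1, 2 * (L2 - 1)))
--     return [xcheck_coords, zcheck_coords]
-- ===== Notes on version B (the rewrite author's own statement) =====
-- stated objective: simpler
-- what changed: Replaces A's linear recursion on L1 (which extends both sets level by level) with two independent iterative comprehension-style loops that build the x-check and z-check sets directly.
import Mathlib
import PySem

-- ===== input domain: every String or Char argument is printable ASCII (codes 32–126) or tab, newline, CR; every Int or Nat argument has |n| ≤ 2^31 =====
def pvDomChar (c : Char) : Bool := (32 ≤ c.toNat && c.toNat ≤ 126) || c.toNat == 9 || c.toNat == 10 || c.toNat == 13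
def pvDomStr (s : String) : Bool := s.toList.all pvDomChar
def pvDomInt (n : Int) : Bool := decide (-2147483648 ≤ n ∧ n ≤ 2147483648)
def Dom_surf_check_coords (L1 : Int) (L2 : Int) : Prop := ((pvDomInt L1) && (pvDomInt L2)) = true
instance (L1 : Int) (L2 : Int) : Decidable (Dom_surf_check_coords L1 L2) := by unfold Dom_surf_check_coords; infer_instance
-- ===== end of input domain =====

-- B replaces A's recursion on L1 by two independent iterative loops building the x- and z-check sets directly (simpler decomposition, same cost).

-- ===== PORT A =====
-- A recurses on L1 with base case L1 == 1; for L1 ≤ 0 Python never reaches the base case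
-- (RecursionError), so the port is driven by the Nat L1.toNat, with an unreachable-under-Pre_ 0 case.
def surfA_go : Nat → Int → (List (Int × Int)) × (List (Int × Int))
  | 0, _ => ([], [])
  | 1, L2 =>
      (PySem.Set.ofList ((PySem.List.pyRange 0 (L2 - 1) 1).map (fun jj => ((0 : Int), 2 * jj + 1))),
       PySem.Set.empty)
  | (n+2), L2 =>
      let p := surfA_go (n+1) L2
      let xcoord : Int := 2 * ((n : Int) + 2) - 2
      let p := (PySem.List.pyRange 0 (L2 - 1) 1).foldl
        (fun (p : (List (Int × Int)) × (List (Int × Int))) jj =>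
          (PySem.Set.add p.1 (xcoord, 2 * jj + 1), PySem.Set.add p.2 (xcoord - 1, 2 * jj))) p
      (p.1, PySem.Set.add p.2 (xcoord - 1, 2 * (L2 - 1)))

def surf_check_coords (L1 : Int) (L2 : Int) : List (List (Int × Int)) :=
  let p := surfA_go L1.toNat L2
  [p.1, p.2]

-- ===== PORT B =====
def surf_check_coords_alt (L1 : Int) (L2 : Int) : List (List (Int × Int)) :=
  let x := (PySem.List.pyRange 0 L1 1).foldl
    (fun s ii => (PySem.List.pyRange 0 (L2 - 1) 1).foldl
      (fun s jj => PySem.Set.add s (2 * ii, 2 * jj + 1)) s)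
    PySem.Set.empty
  let z := (PySem.List.pyRange 1 L1 1).foldl
    (fun s ii => PySem.Set.add
      ((PySem.List.pyRange 0 (L2 - 1) 1).foldl
        (fun s jj => PySem.Set.add s (2 * ii - 1, 2 * jj)) s)
      (2 * ii - 1, 2 * (L2 - 1)))
    PySem.Set.empty
  [x, z]

-- ===== PRECONDITION & SPEC =====
-- Pre_ excludes L1 ≤ 0, on which A's recursion never reaches its base case (RecursionError).
def Pre_surf_check_coords (L1 : Int) (L2 : Int) : Prop := 1 ≤ L1
instance (L1 : Int) (L2 : Int) : Decidable (Pre_surf_check_coords L1 L2) := by unfold Pre_surf_check_coords; infer_instance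
def pvWitness_surf_check_coords : Int × Int := (3, 3)

def Spec_surf_check_coords (L1 : Int) (L2 : Int) (out : List (List (Int × Int))) : Prop := out = surf_check_coords_alt L1 L2
instance (L1 : Int) (L2 : Int) (out : List (List (Int × Int))) : Decidable (Spec_surf_check_coords L1 L2 out) := by unfold Spec_surf_check_coords; infer_instance

-- ===== CLAIM (what is proved, stated in full; the proofs are below) =====
def Claim_equal_surf_check_coords : Prop := ∀ (L1 : Int) (L2 : Int), Dom_surf_check_coords L1 L2 → Pre_surf_check_coords L1 L2 → Spec_surf_check_coords L1 L2 (surf_check_coords L1 L2)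

-- ===== LEMMAS AND PROOFS =====

-- B's inner loops, named for the proof
def xin (L2 : Int) (s : List (Int × Int)) (ii : Int) : List (Int × Int) :=
  (PySem.List.pyRange 0 (L2 - 1) 1).foldl (fun s jj => PySem.Set.add s (2 * ii, 2 * jj + 1)) s

def zin (L2 : Int) (s : List (Int × Int)) (ii : Int) : List (Int × Int) :=
  PySem.Set.add
    ((PySem.List.pyRange 0 (L2 - 1) 1).foldl (fun s jj => PySem.Set.add s (2 * ii - 1, 2 * jj)) s)
    (2 * ii - 1, 2 * (L2 - 1))

lemma alt_eq (L1 L2 : Int) :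
    surf_check_coords_alt L1 L2 =
      [(PySem.List.pyRange 0 L1 1).foldl (xin L2) PySem.Set.empty,
       (PySem.List.pyRange 1 L1 1).foldl (zin L2) PySem.Set.empty] := rfl

lemma A_fold_split (l : List Int) (c : Int) (p : (List (Int × Int)) × (List (Int × Int))) :
    l.foldl (fun (p : (List (Int × Int)) × (List (Int × Int))) jj =>
        (PySem.Set.add p.1 (c, 2 * jj + 1), PySem.Set.add p.2 (c - 1, 2 * jj))) p
      = (l.foldl (fun s jj => PySem.Set.add s (c, 2 * jj + 1)) p.1,
         l.foldl (fun s jj => PySem.Set.add s (c - 1, 2 * jj)) p.2) := by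
  induction l generalizing p with
  | nil => rfl
  | cons x xs ih => simp [List.foldl, ih]

lemma go_eq (n : Nat) (L2 : Int) :
    surfA_go (n+1) L2 =
      ((PySem.List.pyRange 0 ((n : Int) + 1) 1).foldl (xin L2) PySem.Set.empty,
       (PySem.List.pyRange 1 ((n : Int) + 1) 1).foldl (zin L2) PySem.Set.empty) := by
  induction n with
  | zero =>
      have h0 : PySem.List.pyRange 0 1 1 = [(0 : Int)] := by
        have := PySem.List.pyRange_one_singleton (0 : Int); simpa using this
      have h1 : PySem.List.pyRange 1 1 1 = ([] : List Int) :=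
        PySem.List.pyRange_one_eq_nil le_rfl
      simp only [Nat.cast_zero, zero_add, h0, h1, List.foldl]
      simp only [surfA_go, PySem.Set.ofList_eq_foldl, List.foldl_map]
      unfold xin
      norm_num
  | succ n ih =>
      show surfA_go (n+2) L2 = _
      rw [show ((((n+1 : Nat)) : Int) + 1) = ((n : Int) + 1 + 1) by push_cast; ring]
      rw [PySem.List.pyRange_one_succ_right (show (0:Int) ≤ (n:Int) + 1 by omega),
          PySem.List.pyRange_one_succ_right (show (1:Int) ≤ (n:Int) + 1 by omega),
          List.foldl_append, List.foldl_append]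
      simp only [List.foldl]
      simp only [surfA_go]
      rw [ih, A_fold_split]
      unfold xin zin
      rw [show (2 * ((n:Int) + 2) - 2) = 2 * ((n:Int) + 1) by ring]

-- ===== VERDICT (by name: the statement is the Claim_ definition above) =====
theorem surf_check_coords_spec : Claim_equal_surf_check_coords := by
  intro L1 L2 _ hpre
  unfold Spec_surf_check_coords
  have hL0 : 1 ≤ L1 := hpre
  obtain ⟨n, hn⟩ : ∃ n : Nat, L1.toNat = n + 1 := ⟨L1.toNat - 1, by omega⟩
  have hL : 1 ≤ L1 := hpre
  have hcast : ((n : Int) + 1) = L1 := by omega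
  unfold surf_check_coords
  rw [hn, go_eq, alt_eq, hcast]
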